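/-
  SEGMENT C5 OF `start_decoder` (THE SPARSE → DENSE CONVERSION `if (c->sparse && total >= c->entries >> 2)`: the
  `setup_temp_memory_required` statistic, setup_malloc, memcpy, setup_temp_free of P1, `lengths = c->codeword_lengths`, `c->sparse = 0`;
  then `sorted_count`: loop 3818 `for (j=0; j < c->entries; ++j)` for a dense book; stb_vorbis_fixed.c:3799–3822, 0x114594 … 0x114662 +
  0x114825 … 0x114879, 73 instructions), SPLIT IN FIVE at the three call returns that have labels (`cut110`, `cut111`, `cut112`: the cut
  points the farm's worker of C5 proposed) and at the head of loop 3818 (`loop10` = `cut126`).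

      StartDecoder.In5M / At5M           0x1145e9 (`cut110`), setup_malloc has returned: the sparse book with its temp block P1, over the
                                         ghost arena AFTER the call, and the allocator's result in `rax` (NULL, or a block of `E` bytes
                                         allocated since `Ai`)
      StartDecoder.In5N / At5N           0x11461d (`cut111`), memcpy has returned: `codeword_lengths = p` holds the copy (`LenL p E`),
                                         `r13 = c + 4`, P1 still allocated
      StartDecoder.In5O / At5O           0x114636 (`cut112`), setup_temp_free has returned: temps = [], `sparse` is still 1 in memory
      StartDecoder.In5L / At5L           0x11484a (`loop10`), the head of loop 3818: the clauses of `InC6` for a dense book, + `r12d = j ≤ E`,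
                                         `ebp = #{j′ < j : 11 ≤ lengths[j′] ≤ 254}`, `E = e` (the loop bound as a ghost of the claims)
      StartDecoder.SegC5a                0x114594 → `AtC6` (the book stays sparse) ∨ 0x11484a with `j = 0` (dense from the start) ∨ 0x1145e9
      StartDecoder.SegC5b                0x1145e9 → 0x11461d ∨ ERR (NULL: stub 0x114825)
      StartDecoder.SegC5c                0x11461d → 0x114636   (setup_temp_free of P1)
      StartDecoder.SegC5d                0x114636 → 0x11484a with `j = 0`   (`lengths = c->codeword_lengths`, `c->sparse = 0`, the tail)
      StartDecoder.SegC5e                ONE ROUND of loop 3818: 0x11484a → `AtC6` (`E ≤ j`) ∨ 0x11484a with `j + 1`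
      StartDecoder.SegC5.of_parts        SegC5a → … → SegC5e → SegC5   (the claim `SegC5` of StartDecoderA.lean is unchanged)

  THE JOIN TAIL 0x114651 … 0x114662 (+ 0x11483c … 0x114844: `j = 0`, `sorted_count = 0`) is walked by `C5a` (two arms: `sparse` read
  as 1 → `AtC6`; read as 0 → the loop head) AND by `C5d` (`sparse = 0` was just stored: only the second arm) — no label and no join
  assertion at 0x114651.
  REGISTERS AT THE CUTS (callee-saved only): `r14 = c` (`Cur.r14`); `rbx = lengths` (the temp block P1 until 0x11463f reloads it from
  `c->codeword_lengths`; dead at `cut112`); `r13 = c + 4` at `cut111` only (set 0x114602, read 0x11461d); `r12 = p` is re-read from memory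
  (0x11463f), `rbp` (`total`) is dead from `cut110` on (after a conversion the book is dense: 0x114841 resets `ebp`), `r15` (= f) is
  dead at every cut (`rdi` comes from `q[R+18H]`, `Cur.slot_f`). In the loop: `r12d = j`, `ebp = sorted_count`, `r13 = sparse = 0`
  (`movzx r13d, BYTE [r14+1BH]` at 0x11465a; read by C6 at 0x11467b: `InC6.r13`), `rbx = lengths`.
-/
import Vorbis.Spec.StartDecoderA
import Vorbis.Spec.StartDecoderCarry
namespace Vorbis.Spec.StartDecoder
open X86 X86.User Asan

/-- **`cut110`, 0x1145e9: `setup_malloc(f, c->entries)` has returned** (line 3804, before `mov r12,rax`): the book is sparse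
(`sparse = 1`: the `je` of 0x1145a2 was not taken), `codeword_lengths` is still NULL, `rbx = lengths` = the temp block P1 (the only
temp block), L(E), c fresh. `A` is the ghost arena AFTER the call (`Cur.alloc_call`: `(A₀.pushSetup E, A₀.newSetupObj E :: …)`;
`Cur.alloc_fail_any`: unchanged — `pushSetup` leaves `temps`). The allocator's result: `rax = NULL`, or the block of `E` bytes it
allocated (since `Ai`: `.older` of `Since A₀ A.1`). DEAD: `rbp` (total), `r12`, `r13`, `r15`. -/
structure In5M (u₀ : State) (g : Ghost) (i : Nat) (A2 A3 Ai : Arena) (A : Arena × List Obj) (lengths : Nat) (v : State) :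
    Prop where
  frame : Frame u₀ g L.start_decoder.cut110 A v
  cur : Cur g i A2 A3 Ai A v
  k1 : Codebook.K1 v.mem (g.cb v.mem i)
  sparse1 : Codebook.sparse v.mem (g.cb v.mem i) = 1
  /-- `LengthsAt.sparse_null`; overwritten at 0x1145f5 -/
  null : Codebook.codeword_lengths v.mem (g.cb v.mem i) = 0
  /-- read at 0x114612 (memcpy's source) and 0x114629 (the free) -/
  rbx : v.reg .rbx = addr lengths
  /-- `LengthsAt.sparse_temp` -/
  temps : TempsAre A.1 [(lengths, (Codebook.entries v.mem (g.cb v.mem i)).toNat)]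
  /-- L(E) -/
  lenL : LenL v.mem lengths (Codebook.entries v.mem (g.cb v.mem i)).toNat
  fresh : Fresh7 v.mem (g.cb v.mem i)
  /-- the allocator's result (read at 0x1145e9 `mov r12,rax`, tested at 0x1145f9) -/
  alloc : v.reg .rax = 0 ∨
    Since Ai A.1 ⟨(v.reg .rax).toNat, (Codebook.entries v.mem (g.cb v.mem i)).toNat⟩

/-- `At5M`: `In5M` for some ghost arena, `lengths` block and ghost snapshots. Exit of `C5a`, entry of `C5b`. -/
def At5M (u₀ : State) (g : Ghost) (i : Nat) (v : State) : Prop :=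
  ∃ (A : Arena × List Obj) (lengths : Nat) (A2 A3 Ai : Arena), In5M u₀ g i A2 A3 Ai A lengths v

/-- **`cut111`, 0x11461d: `memcpy(c->codeword_lengths, lengths, c->entries)` has returned** (line 3806): `codeword_lengths = p` is
stored (0x1145f5), `p` is a block of `E` bytes allocated since `Ai` and holds the copy: L(E) over `p` (memcpy's post + `In5M.lenL`:
`LenL.copy`; the bytes of the temp block are not read again). `r13 = c + 4` (set 0x114602, read 0x11461d), `rbx = lengths` = P1, still
allocated (read 0x114629). DEAD: `r12` (= p; 0x11463f re-reads it from the struct), `rbp`, `r15`. -/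
structure In5N (u₀ : State) (g : Ghost) (i : Nat) (A2 A3 Ai : Arena) (A : Arena × List Obj) (lengths : Nat) (v : State) :
    Prop where
  frame : Frame u₀ g L.start_decoder.cut111 A v
  cur : Cur g i A2 A3 Ai A v
  k1 : Codebook.K1 v.mem (g.cb v.mem i)
  sparse1 : Codebook.sparse v.mem (g.cb v.mem i) = 1
  rbx : v.reg .rbx = addr lengths
  r13 : v.reg .r13 = addr (g.cb v.mem i + 4)
  temps : TempsAre A.1 [(lengths, (Codebook.entries v.mem (g.cb v.mem i)).toNat)]
  /-- the final block of the `lengths` array -/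
  block : Since Ai A.1 ⟨Codebook.codeword_lengths v.mem (g.cb v.mem i), (Codebook.entries v.mem (g.cb v.mem i)).toNat⟩
  /-- L(E), of the copy -/
  lenL : LenL v.mem (Codebook.codeword_lengths v.mem (g.cb v.mem i)) (Codebook.entries v.mem (g.cb v.mem i)).toNat
  fresh : Fresh7 v.mem (g.cb v.mem i)

/-- `At5N`: `In5N` for some ghost arena, `lengths` block and ghost snapshots. Exit of `C5b`, entry of `C5c`. -/
def At5N (u₀ : State) (g : Ghost) (i : Nat) (v : State) : Prop :=
  ∃ (A : Arena × List Obj) (lengths : Nat) (A2 A3 Ai : Arena), In5N u₀ g i A2 A3 Ai A lengths v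

/-- **`cut112`, 0x114636: `setup_temp_free(f, lengths, c->entries)` has returned** (line 3807): P1 is released (temps = []; the ghost
arena is `Cur.free_call`'s), the array is the setup block `codeword_lengths`; the byte `sparse` is still 1 in memory (0x11464c
stores the 0). DEAD: `rbx` (the released pointer; 0x11463f reloads it), `r12`, `r13`, `rbp`, `r15`. -/
structure In5O (u₀ : State) (g : Ghost) (i : Nat) (A2 A3 Ai : Arena) (A : Arena × List Obj) (v : State) : Prop where
  frame : Frame u₀ g L.start_decoder.cut112 A v
  cur : Cur g i A2 A3 Ai A v
  k1 : Codebook.K1 v.mem (g.cb v.mem i)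
  sparse1 : Codebook.sparse v.mem (g.cb v.mem i) = 1
  block : Since Ai A.1 ⟨Codebook.codeword_lengths v.mem (g.cb v.mem i), (Codebook.entries v.mem (g.cb v.mem i)).toNat⟩
  lenL : LenL v.mem (Codebook.codeword_lengths v.mem (g.cb v.mem i)) (Codebook.entries v.mem (g.cb v.mem i)).toNat
  noTemps : A.1.temps = []
  fresh : Fresh7 v.mem (g.cb v.mem i)

/-- `At5O`: `In5O` for some ghost arena and ghost snapshots. Exit of `C5c`, entry of `C5d`. -/
def At5O (u₀ : State) (g : Ghost) (i : Nat) (v : State) : Prop :=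
  ∃ (A : Arena × List Obj) (A2 A3 Ai : Arena), In5O u₀ g i A2 A3 Ai A v

/-- **THE INVARIANT OF LOOP 3818 at its head 0x11484a** (`loop10`): the clauses of `InC6` for a DENSE book (`sparse = 0`, so
`InC6.sparse_count` is vacuous and `place` is in its dense branch) with the counter: `r12d = j ≤ E` (the whole register:
`mov r12d,[rsp+24H]`, `add r12d,1`), `ebp = longCount lengths j` (`mov ebp,r12d`, `add ebp,1`), and the bound `E = e`. First arrival:
`j = 0` (`d[R+24H] = 0`: Z24), `ebp = 0`. -/
structure In5L (u₀ : State) (g : Ghost) (i : Nat) (A2 A3 Ai : Arena) (A : Arena × List Obj) (lengths : Nat) (e : Int) (j : Nat)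
    (v : State) : Prop where
  frame : Frame u₀ g L.start_decoder.loop10 A v
  cur : Cur g i A2 A3 Ai A v
  k1 : Codebook.K1 v.mem (g.cb v.mem i)
  sparse0 : Codebook.sparse v.mem (g.cb v.mem i) = 0
  /-- `InC6.r13`'s text (= 0 here) -/
  r13 : v.reg .r13 = addr (Codebook.sparse v.mem (g.cb v.mem i))
  rbx : v.reg .rbx = addr lengths
  lenL : LenL v.mem lengths (Codebook.entries v.mem (g.cb v.mem i)).toNat
  place : LengthsAt (Since Ai A.1) A v.mem (g.cb v.mem i) lengths
  fresh : Fresh7 v.mem (g.cb v.mem i)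
  /-- the counter of loop 3818 -/
  r12 : v.reg .r12 = addr j
  j_le : (j : Int) ≤ Codebook.entries v.mem (g.cb v.mem i)
  /-- sorted_count so far -/
  rbp : v.reg .rbp = addr (longCount v.mem lengths j)
  /-- the loop bound, named: no instruction of the loop writes `c->entries` -/
  e_eq : Codebook.entries v.mem (g.cb v.mem i) = e

/-- `At5L e j`: `In5L` for some ghost arena, `lengths` array and ghost snapshots. -/
def At5L (u₀ : State) (g : Ghost) (i : Nat) (e : Int) (j : Nat) (v : State) : Prop :=
  ∃ (A : Arena × List Obj) (lengths : Nat) (A2 A3 Ai : Arena), In5L u₀ g i A2 A3 Ai A lengths e j v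

namespace C5

/-- **A window a round of loop 3818 may write**: the stack below the steady `R` (the return address of a check call, the check
routine's frame). The loop stores nothing else. -/
def QuietWin5 (g : Ghost) (w : Span) : Prop :=
  g.R - 408 ≤ w.lo ∧ w.hi ≤ g.R

set_option maxHeartbeats 1000000 in
/-- **The memory side of the carry of `In5L`** (what `carry5L` and `out5L` share): over a stretch that writes only the stack below
`R`, `Frame` and `Cur` at the new state and program counter, `cb(i)` unmoved, every field of the struct, and the bytes of the
`lengths` array (a block allocated since `Ai`: `LengthsAt.dense_block`). -/
theorem core5L {u₀ : State} {g : Ghost} {i : Nat} {A2 A3 Ai : Arena} {A : Arena × List Obj} {lengths : Nat} {e : Int} {j : Nat}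
    {pc' : Word} {v w : State} {ws : List Span} (h : In5L u₀ g i A2 A3 Ai A lengths e j v)
    (hs : Mem.SameExcept ws v.mem w.mem) (hun : ShadowUntouched v.mem w.mem) (hq : ∀ x, x ∈ ws → QuietWin5 g x)
    (hrip : w.rip = pc') (hrsp : w.reg .rsp = v.reg .rsp) (hcode : CodeOK u₀ w.mem) (hinv : abiInv w)
    (hr14 : w.reg .r14 = v.reg .r14) :
    Frame u₀ g pc' A w ∧ Cur g i A2 A3 Ai A w ∧ g.cb w.mem i = g.cb v.mem i ∧
      Codebook.SameFields v.mem w.mem (g.cb v.mem i) ∧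
      Mem.EqOn lengths (lengths + (Codebook.entries v.mem (g.cb v.mem i)).toNat) v.mem w.mem ∧
      lengths + (Codebook.entries v.mem (g.cb v.mem i)).toNat ≤ 2 ^ 64 := by
  have hfr := h.frame
  have hpos : Pos g A := Pos.of hfr h.cur
  have hm0 : MInv g i A2 A3 Ai A v.mem := MInv.of hfr h.cur
  have hcw := hm0.c_where
  have p1 := hpos.r_eq
  have p2 := hpos.ra_lo
  have p3 := hpos.ra_hi
  have hq0 : ∀ x, x ∈ ws → OkWin0 g (g.cb v.mem i) x := by
    intro x hx
    have k := hq x hx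
    unfold QuietWin5 at k
    unfold OkWin0
    omega
  have hq1 : ∀ x, x ∈ ws → OkWin0 g (g.cb v.mem i + 2120) x := by
    intro x hx
    have k := hq x hx
    unfold QuietWin5 at k
    unfold OkWin0
    omega
  have hb : Bits (g.Blk A) g.len w.mem g.f := by
    apply bits_kept hpos hm0.sd.bits hs
    intro x hx
    have k := hq x hx
    unfold QuietWin5 at k
    omega
  have hF := Frame.step hfr h.cur hs hun (fun x hx => (hq0 x hx).ok) hb hrip hrsp hcode hinv
  obtain ⟨hC, hcb⟩ := Cur.step hfr h.cur hs hun (fun x hx => (hq0 x hx).ok) hb hr14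
  have hstruct : (Codebook.block (g.cb v.mem i)).Kept v.mem w.mem := by
    apply blk_kept0 (c := g.cb v.mem i + 2120) hpos hs hq1
    · simp only [vblock, voff]
      omega
    · simp only [vblock, voff]
      omega
  have hsf := Codebook.SameFields.of_kept hstruct
  have hlen : (Block.mk lengths (Codebook.entries v.mem (g.cb v.mem i)).toNat).Kept v.mem w.mem :=
    young_kept0 hm0 hpos hs hq0 (h.place.dense_block h.sparse0)
  exact ⟨hF, hC, hcb, hsf, hlen.same, hlen.inside⟩

/-- **THE CARRY OF THE INVARIANT OF LOOP 3818** over a stretch that writes only the stack below `R` (check calls): `In5L` at the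
loop head for the NEW counter `j'` and count the registers hold there (both stated for the OLD memory: the `lengths` array is
kept). WHEN: the back-edge exit of `C5e`. `hs` = the walker's memory fact as a `Mem.SameExcept` (`Mem.SameExcept.writeLE` per
push), `hun` by `v_untouched`, `hq` per window `unfold C5.QuietWin5; omega`. -/
theorem carry5L {u₀ : State} {g : Ghost} {i : Nat} {A2 A3 Ai : Arena} {A : Arena × List Obj} {lengths : Nat} {e : Int}
    {j j' : Nat} {v w : State} {ws : List Span} (h : In5L u₀ g i A2 A3 Ai A lengths e j v)
    (hs : Mem.SameExcept ws v.mem w.mem) (hun : ShadowUntouched v.mem w.mem) (hq : ∀ x, x ∈ ws → QuietWin5 g x)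
    (hrip : w.rip = L.start_decoder.loop10) (hrsp : w.reg .rsp = v.reg .rsp) (hcode : CodeOK u₀ w.mem) (hinv : abiInv w)
    (hr14 : w.reg .r14 = v.reg .r14) (hr13 : w.reg .r13 = v.reg .r13) (hrbx : w.reg .rbx = v.reg .rbx)
    (hr12 : w.reg .r12 = addr j') (hj : (j' : Int) ≤ Codebook.entries v.mem (g.cb v.mem i))
    (hrbp : w.reg .rbp = addr (longCount v.mem lengths j')) :
    In5L u₀ g i A2 A3 Ai A lengths e j' w := by
  obtain ⟨hF, hC, hcb, hsf, heq, hin⟩ := core5L h hs hun hq hrip hrsp hcode hinv hr14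
  have hs0 : Codebook.sparse w.mem (g.cb v.mem i) = 0 := by
    rw [hsf.sparse]
    exact h.sparse0
  have hnn := h.k1.ent_nonneg
  have hj' : j' ≤ (Codebook.entries v.mem (g.cb v.mem i)).toNat := by omega
  have hcnt : longCount w.mem lengths j' = longCount v.mem lengths j' :=
    (counts_same (Mem.EqOn.mono heq (Nat.le_refl _) (by omega)) (by omega)).2
  exact
    { frame := hF
      cur := hC
      k1 := by rw [hcb]; exact h.k1.frame hsf
      sparse0 := by rw [hcb]; exact hs0
      r13 := by rw [hcb, hsf.sparse, hr13]; exact h.r13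
      rbx := by rw [hrbx]; exact h.rbx
      lenL := by rw [hcb, hsf.entries]; exact h.lenL.same heq hin
      place := by
        rw [hcb]
        exact
          { sparse_01 := Or.inl hs0
            sparse_temp := fun h1 => by rw [hs0] at h1; exact absurd h1 (by decide)
            sparse_null := fun h1 => by rw [hs0] at h1; exact absurd h1 (by decide)
            dense_block := fun _ => by rw [hsf.entries]; exact h.place.dense_block h.sparse0
            dense_eq := fun _ => by rw [hsf.codeword_lengths]; exact h.place.dense_eq h.sparse0
            dense_temps := fun _ => h.place.dense_temps h.sparse0 }
      fresh := by
        rw [hcb]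
        exact ⟨⟨⟨by rw [hsf.lookup_type]; exact h.fresh.lookup_type, by rw [hsf.lookup_values]; exact h.fresh.lookup_values,
          by rw [hsf.multiplicands]; exact h.fresh.multiplicands⟩,
          by rw [hsf.sorted_codewords]; exact h.fresh.sorted_codewords, by rw [hsf.sorted_values]; exact h.fresh.sorted_values⟩,
          by rw [hsf.codewords]; exact h.fresh.codewords, by rw [hsf.sorted_entries]; exact h.fresh.sorted_entries⟩
      r12 := hr12
      j_le := by rw [hcb, hsf.entries]; exact hj
      rbp := by rw [hcnt]; exact hrbp
      e_eq := by rw [hcb, hsf.entries]; exact h.e_eq }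

/-- **The exit of the loop** (`jle 0x114668` taken at 0x114857: `E ≤ j`, so `j = E`): over a stretch that writes only the stack below
`R`, `AtC6` with `sorted_count = longCount lengths E` (the dense branch of `InC6`; `sparse_count` is vacuous). -/
theorem out5L {u₀ : State} {g : Ghost} {i : Nat} {A2 A3 Ai : Arena} {A : Arena × List Obj} {lengths : Nat} {e : Int} {j : Nat}
    {v w : State} {ws : List Span} (h : In5L u₀ g i A2 A3 Ai A lengths e j v)
    (hs : Mem.SameExcept ws v.mem w.mem) (hun : ShadowUntouched v.mem w.mem) (hq : ∀ x, x ∈ ws → QuietWin5 g x)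
    (hrip : w.rip = pc_C6) (hrsp : w.reg .rsp = v.reg .rsp) (hcode : CodeOK u₀ w.mem) (hinv : abiInv w)
    (hr14 : w.reg .r14 = v.reg .r14) (hr13 : w.reg .r13 = v.reg .r13) (hrbx : w.reg .rbx = v.reg .rbx)
    (hrbp : w.reg .rbp = v.reg .rbp) (hj : j = (Codebook.entries v.mem (g.cb v.mem i)).toNat) : AtC6 u₀ g i w := by
  obtain ⟨hF, hC, hcb, hsf, heq, hin⟩ := core5L h hs hun hq hrip hrsp hcode hinv hr14
  have hs0 : Codebook.sparse w.mem (g.cb v.mem i) = 0 := by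
    rw [hsf.sparse]
    exact h.sparse0
  have hcnt : longCount w.mem lengths j = longCount v.mem lengths j := by
    rw [hj]
    exact (counts_same heq hin).2
  refine ⟨A, lengths, longCount v.mem lengths j, A2, A3, Ai, ?_⟩
  exact
    { frame := hF
      cur := hC
      k1 := by rw [hcb]; exact h.k1.frame hsf
      r13 := by rw [hcb, hsf.sparse, hr13]; exact h.r13
      rbx := by rw [hrbx]; exact h.rbx
      rbp := by rw [hrbp]; exact h.rbp
      lenL := by rw [hcb, hsf.entries]; exact h.lenL.same heq hin
      place := by
        rw [hcb]
        exact
          { sparse_01 := Or.inl hs0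
            sparse_temp := fun h1 => by rw [hs0] at h1; exact absurd h1 (by decide)
            sparse_null := fun h1 => by rw [hs0] at h1; exact absurd h1 (by decide)
            dense_block := fun _ => by rw [hsf.entries]; exact h.place.dense_block h.sparse0
            dense_eq := fun _ => by rw [hsf.codeword_lengths]; exact h.place.dense_eq h.sparse0
            dense_temps := fun _ => h.place.dense_temps h.sparse0 }
      sparse_count := by
        rw [hcb]
        intro h1
        rw [hs0] at h1
        exact absurd h1 (by decide)
      dense_count := by
        rw [hcb, hsf.entries]
        intro _
        rw [← hj, hcnt]
      fresh := by
        rw [hcb]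
        exact ⟨⟨⟨by rw [hsf.lookup_type]; exact h.fresh.lookup_type, by rw [hsf.lookup_values]; exact h.fresh.lookup_values,
          by rw [hsf.multiplicands]; exact h.fresh.multiplicands⟩,
          by rw [hsf.sorted_codewords]; exact h.fresh.sorted_codewords, by rw [hsf.sorted_values]; exact h.fresh.sorted_values⟩,
          by rw [hsf.codewords]; exact h.fresh.codewords, by rw [hsf.sorted_entries]; exact h.fresh.sorted_entries⟩ }

end C5

/-- **Segment `start_decoder.C5a`** (0x114594 … 0x1145e4 with the join tail 0x114651 … 0x114662 and 0x11483c … 0x114844; 28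
instructions: `sparse` (check 0x114598); dense → the tail; sparse and `E >> 2 > total` (check 0x1145ac, `sar eax,2 ; cmp eax,ebp ;
jg`) → the tail, which reads `sparse = 1` → 0x114668 = `AtC6` with `4·total < E`; otherwise the conversion: the statistic
`if (E > f->setup_temp_memory_required) … = E` (check 0x1145cc, the UNCHECKED store 0x1145d7 into `[f+16, f+20)`),
`call setup_malloc(f, E)`): from the entry of C5 to `AtC6`, to the head of loop 3818 with `j = 0`, or to the return of setup_malloc. -/
def SegC5a (Lay : Layout) (μ : Microarch) (u₀ : State) : Prop :=
  ∀ (g : Ghost) (i : Nat) (v : State), AtC5 u₀ g i v →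
    ReachVia Lay μ WayInv v (fun w => AtC6 u₀ g i w ∨ (∃ e, At5L u₀ g i e 0 w) ∨ At5M u₀ g i w)

/-- **Segment `start_decoder.C5b`** (0x1145e9 … 0x114618 with the stub 0x114825 … 0x114837; 18 instructions: the checked store
`c->codeword_lengths = p` (0x1145f5, BEFORE the NULL test), NULL → `error(f, 3)`, `jmp 0x113b22`; otherwise `r13 = c + 4`, the load of
`entries` (check 0x114609) and `call memcpy(p, lengths, E)`): from the return of setup_malloc to the return of memcpy, or to the error
exit. -/
def SegC5b (Lay : Layout) (μ : Microarch) (u₀ : State) : Prop :=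
  ∀ (g : Ghost) (i : Nat) (v : State), At5M u₀ g i v → ReachVia Lay μ WayInv v (fun w => At5N u₀ g i w ∨ AtERR u₀ g w)

/-- **Segment `start_decoder.C5c`** (0x11461d … 0x114631, 6 instructions: the load of `entries` (check 0x114620),
`call setup_temp_free(f, lengths, E)`: the LIFO release of P1, the only temp block): from the return of memcpy to the return of
setup_temp_free. -/
def SegC5c (Lay : Layout) (μ : Microarch) (u₀ : State) : Prop :=
  ∀ (g : Ghost) (i : Nat) (v : State), At5N u₀ g i v → ReachVia Lay μ WayInv v (fun w => At5O u₀ g i w)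

/-- **Segment `start_decoder.C5d`** (0x114636 … 0x11464c, the join tail 0x114651 … 0x114662 and 0x11483c … 0x114844; 14 instructions:
`rbx = c->codeword_lengths` (check 0x11463a), the checked byte store `c->sparse = 0` (0x11464c), then the tail: `r13d = sparse` = 0
(check 0x114655), `je 0x11483c` taken, `j = 0` from `d[R+24H]`, `sorted_count = 0`): from the return of setup_temp_free to the head of
loop 3818 with `j = 0`. No contract call. -/
def SegC5d (Lay : Layout) (μ : Microarch) (u₀ : State) : Prop :=
  ∀ (g : Ghost) (i : Nat) (v : State), At5O u₀ g i v → ReachVia Lay μ WayInv v (fun w => ∃ e, At5L u₀ g i e 0 w)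

/-- **Segment `start_decoder.C5e`** (ONE ROUND of loop 3818: 0x11484a … 0x114879 and the increment 0x114846; 15 instructions: `E ≤ j`
(signed; check 0x11484e) → 0x114668 = `AtC6` with `sorted_count = longCount lengths E`; otherwise `b = lengths[j]` (check 0x114866),
`sub eax,0BH ; cmp al,0F3H ; ja`: counted iff `11 ≤ b ≤ 254` (`longCount_succ_long / _short`), `++j`): from the head of the loop to
`AtC6` or to the head with `j + 1`. No contract call. -/
def SegC5e (Lay : Layout) (μ : Microarch) (u₀ : State) : Prop :=
  ∀ (g : Ghost) (i : Nat) (e : Int) (j : Nat) (v : State), At5L u₀ g i e j v →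
    ReachVia Lay μ WayInv v (fun w => AtC6 u₀ g i w ∨ At5L u₀ g i e (j + 1) w)

/-- **Segment C5 from its five parts**: loop 3818 by induction on `e − j` (the exit `At5L e (j + 1)` of a round carries
`j + 1 ≤ E = e`: `In5L.j_le`, `In5L.e_eq`); the rest by `ReachVia.trans`. -/
theorem SegC5.of_parts {Lay : Layout} {μ : Microarch} {u₀ : State} (ha : SegC5a Lay μ u₀) (hb : SegC5b Lay μ u₀)
    (hc : SegC5c Lay μ u₀) (hd : SegC5d Lay μ u₀) (he : SegC5e Lay μ u₀) : SegC5 Lay μ u₀ := by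
  intro g i v hat
  -- loop 3818: from its head with any `j` to `AtC6`
  have hloop : ∀ (e : Int) (m j : Nat) (s : State), At5L u₀ g i e j s → (e - j).toNat ≤ m →
      ReachVia Lay μ WayInv s (fun w => AtC6 u₀ g i w ∨ AtERR u₀ g w) := by
    intro e m
    induction m with
    | zero =>
      intro j s hs hm
      refine (he g i e j s hs).trans ?_
      intro w hw
      rcases hw with h6 | hn
      · exact ReachVia.done (Or.inl h6)
      · obtain ⟨_, _, _, _, _, hn'⟩ := hn
        have hle := hn'.j_le
        rw [hn'.e_eq] at hle
        omega
    | succ m ih =>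
      intro j s hs hm
      refine (he g i e j s hs).trans ?_
      intro w hw
      rcases hw with h6 | hn
      · exact ReachVia.done (Or.inl h6)
      · have hle : ((j + 1 : Nat) : Int) ≤ e := by
          obtain ⟨_, _, _, _, _, hn'⟩ := hn
          have hle := hn'.j_le
          rw [hn'.e_eq] at hle
          exact hle
        exact ih (j + 1) w hn (by omega)
  refine (ha g i v hat).trans ?_
  intro w1 h1
  rcases h1 with h6 | hl | hm
  · exact ReachVia.done (Or.inl h6)
  · obtain ⟨e, hl'⟩ := hl
    exact hloop e _ 0 w1 hl' (Nat.le_refl _)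
  · refine (hb g i w1 hm).trans ?_
    intro w2 h2
    rcases h2 with hn | herr
    · refine (hc g i w2 hn).trans ?_
      intro w3 h3
      refine (hd g i w3 h3).trans ?_
      intro w4 h4
      obtain ⟨e, hl'⟩ := h4
      exact hloop e _ 0 w4 hl' (Nat.le_refl _)
    · exact ReachVia.done (Or.inr herr)

end Vorbis.Spec.StartDecoder
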